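-- pv_equiv track=rewrite | github.com/Nicoezg/TDA-Buchwald-2024-2C | PD/juego_gemelas.py | juego
-- ===== SOURCE A (Python) =====
-- from collections import deque
--
-- def juego(londres, california, costo):
--     izq_sum = 0
--     der_sum = 0
--
--     # Convertimos las listas en deques para optimizar las operaciones
--     izq_act = deque(londres)  # Sin la primera moneda
--     der_act = deque(california)  # Sin la última moneda
--
--     while True:
--         if not izq_act or not der_act:
--             break
--
--         izq_der = izq_sum + izq_act[-1]
--         der_der = der_sum + der_act[-1]
--         der_izq = der_sum + der_act[0]
--         izq_izq = izq_sum + izq_act[0]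
--
--         # Guardamos el estado actual para revertir si es necesario
--         aux_izq_act = deque(izq_act)
--
--         # Decisión para izq_sum
--         if izq_izq >= der_izq:
--             izq_sum = izq_izq
--             izq_act.popleft()  # Elimina el primer elemento de izq_act
--         else:
--             izq_sum = der_izq
--             izq_act = deque(der_act)
--             izq_act.popleft()
--
--         # Decisión para der_sum
--         if der_der >= izq_der:
--             der_sum = der_der
--             der_act.pop()  # Elimina el último elemento de der_act
--         else:
--             der_sum = izq_der
--             der_act = deque(aux_izq_act)
--             der_act.pop()
--     return max(izq_sum, der_sum)
-- ===== SOURCE B (Python) =====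
-- def juego(londres, california, costo):
--     # Each deque of A is always a contiguous slice of londres or california:
--     # keep (source, left, right) index ranges instead, so "copies" are O(1).
--     arrs = (londres, california)
--     isum = dsum = 0
--     isrc, il, ir = 0, 0, len(londres)
--     dsrc, dl, dr = 1, 0, len(california)
--     while il < ir and dl < dr:
--         iA = arrs[isrc]
--         dA = arrs[dsrc]
--         izq_der = isum + iA[ir - 1]
--         der_der = dsum + dA[dr - 1]
--         der_izq = dsum + dA[dl]
--         izq_izq = isum + iA[il]
--         if izq_izq >= der_izq:
--             isum2, i2 = izq_izq, (isrc, il + 1, ir)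
--         else:
--             isum2, i2 = der_izq, (dsrc, dl + 1, dr)
--         if der_der >= izq_der:
--             dsum, (dsrc, dl, dr) = der_der, (dsrc, dl, dr - 1)
--         else:
--             dsum, (dsrc, dl, dr) = izq_der, (isrc, il, ir - 1)
--         isum, (isrc, il, ir) = isum2, i2
--     return max(isum, dsum)
-- ===== Notes on version B (the rewrite author's own statement) =====
-- stated objective: faster
-- what changed: B replaces A's deques and O(n) deque copies per iteration by (source, left, right) index ranges over the two fixed input lists, so every loop step is O(1).
import Mathlib
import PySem

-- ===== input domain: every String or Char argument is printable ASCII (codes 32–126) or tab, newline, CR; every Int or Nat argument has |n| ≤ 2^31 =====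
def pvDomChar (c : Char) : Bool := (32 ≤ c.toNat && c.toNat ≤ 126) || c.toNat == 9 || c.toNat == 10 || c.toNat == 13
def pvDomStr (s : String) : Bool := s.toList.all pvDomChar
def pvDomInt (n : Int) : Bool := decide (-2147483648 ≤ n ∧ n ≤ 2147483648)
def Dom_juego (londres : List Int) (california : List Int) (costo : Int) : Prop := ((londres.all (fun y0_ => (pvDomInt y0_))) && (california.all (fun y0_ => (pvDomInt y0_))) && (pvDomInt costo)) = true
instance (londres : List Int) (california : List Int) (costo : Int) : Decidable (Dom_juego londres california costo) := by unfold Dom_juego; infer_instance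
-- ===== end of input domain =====

-- B replaces A's O(length) deque copies by (source, left, right) index ranges over the
-- two fixed input lists, making every loop step O(1) (objective: faster, asymptotic).

-- ===== PORT A =====
-- A's while-loop over the two deques (lists); fuel only guards totality (the loop
-- shortens max length each round, so the initial fuel is never exhausted).
def juegoLoopA : Nat → Int → Int → List Int → List Int → Int
  | 0, isum, dsum, _, _ => max isum dsum
  | fuel + 1, isum, dsum, iz, dz =>
    if iz = [] ∨ dz = [] then max isum dsum
    else
      let izq_der := isum + iz.getLastD 0
      let der_der := dsum + dz.getLastD 0
      let der_izq := dsum + dz.headD 0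
      let izq_izq := isum + iz.headD 0
      -- aux_izq_act = iz (saved before izq's move)
      let p1 : Int × List Int :=
        if izq_izq ≥ der_izq then (izq_izq, iz.tail) else (der_izq, dz.tail)
      let p2 : Int × List Int :=
        if der_der ≥ izq_der then (der_der, dz.dropLast) else (izq_der, iz.dropLast)
      juegoLoopA fuel p1.1 p2.1 p1.2 p2.2

def juego (londres : List Int) (california : List Int) (costo : Int) : Int :=
  juegoLoopA (londres.length + california.length + 1) 0 0 londres california

-- ===== PORT B =====
-- source select: false = londres, true = california (Source B's arrs[src])
def jSrc (L C : List Int) (src : Bool) : List Int := if src then C else L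

def juegoLoopB : Nat → List Int → List Int → Int → Int →
    Bool → Nat → Nat → Bool → Nat → Nat → Int
  | 0, _, _, isum, dsum, _, _, _, _, _, _ => max isum dsum
  | fuel + 1, L, C, isum, dsum, isrc, il, ir, dsrc, dl, dr =>
    if il < ir ∧ dl < dr then
      let iA := jSrc L C isrc
      let dA := jSrc L C dsrc
      let izq_der := isum + iA.getD (ir - 1) 0
      let der_der := dsum + dA.getD (dr - 1) 0
      let der_izq := dsum + dA.getD dl 0
      let izq_izq := isum + iA.getD il 0
      let p1 : Int × Bool × Nat × Nat :=
        if izq_izq ≥ der_izq then (izq_izq, isrc, il + 1, ir)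
        else (der_izq, dsrc, dl + 1, dr)
      let p2 : Int × Bool × Nat × Nat :=
        if der_der ≥ izq_der then (der_der, dsrc, dl, dr - 1)
        else (izq_der, isrc, il, ir - 1)
      juegoLoopB fuel L C p1.1 p2.1 p1.2.1 p1.2.2.1 p1.2.2.2 p2.2.1 p2.2.2.1 p2.2.2.2
    else max isum dsum

def juego_alt (londres : List Int) (california : List Int) (costo : Int) : Int :=
  juegoLoopB (londres.length + california.length + 1) londres california 0 0
    false 0 londres.length true 0 california.length

-- ===== PRECONDITION & SPEC =====
def Spec_juego (londres : List Int) (california : List Int) (costo : Int) (out : Int) : Prop := out = juego_alt londres california costo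
instance (londres : List Int) (california : List Int) (costo : Int) (out : Int) : Decidable (Spec_juego londres california costo out) := by unfold Spec_juego; infer_instance

-- ===== CLAIM (what is proved, stated in full; the proofs are below) =====
def Claim_equal_juego : Prop := ∀ (londres : List Int) (california : List Int) (costo : Int), Dom_juego londres california costo → Spec_juego londres california costo (juego londres california costo)

-- ===== LEMMAS AND PROOFS =====

/-- the list slice a range of B denotes -/
def jSeg (a : List Int) (l r : Nat) : List Int := (a.drop l).take (r - l)

theorem jSeg_headD (a : List Int) (l r : Nat) (hl : l < r) (hr : r ≤ a.length) :
    (jSeg a l r).headD 0 = a.getD l 0 := by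
  have h1 : (jSeg a l r).headD 0 = (jSeg a l r).getD 0 0 := by
    cases h : jSeg a l r <;> simp [List.getD]
  rw [h1]
  unfold jSeg
  rw [List.getD, List.getElem?_take, if_pos (by omega), List.getElem?_drop, List.getD]
  simp

theorem jSeg_len (a : List Int) (l r : Nat) (hr : r ≤ a.length) :
    (jSeg a l r).length = r - l := by
  rw [jSeg, List.length_take, List.length_drop]
  omega

theorem jSeg_tail (a : List Int) (l r : Nat) : (jSeg a l r).tail = jSeg a (l + 1) r := by
  unfold jSeg
  rw [← List.drop_one, List.drop_take, List.drop_drop]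
  congr 1

theorem jSeg_getLastD (a : List Int) (l r : Nat) (hl : l < r) (hr : r ≤ a.length) :
    (jSeg a l r).getLastD 0 = a.getD (r - 1) 0 := by
  have hlen := jSeg_len a l r hr
  have h1 : (jSeg a l r).getLastD 0 = (jSeg a l r).getD ((jSeg a l r).length - 1) 0 := by
    cases h : jSeg a l r with
    | nil => simp
    | cons x xs => rw [List.getLastD_eq_getLast?, List.getLast?_eq_getElem?]; rfl
  rw [h1, hlen]
  unfold jSeg
  rw [List.getD, List.getElem?_take, if_pos (by omega), List.getElem?_drop, List.getD]
  congr 2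
  omega

theorem jSeg_dropLast (a : List Int) (l r : Nat) (hl : l < r) (hr : r ≤ a.length) :
    (jSeg a l r).dropLast = jSeg a l (r - 1) := by
  unfold jSeg
  rw [List.dropLast_eq_take, List.take_take, List.length_take, List.length_drop]
  congr 1
  omega

theorem jSeg_eq_nil_iff (a : List Int) (l r : Nat) (hr : r ≤ a.length) :
    jSeg a l r = [] ↔ ¬ l < r := by
  rw [← List.length_eq_zero_iff, jSeg_len a l r hr]
  omega

theorem juegoLoop_eq (fuel : Nat) (L C : List Int) :
    ∀ (isum dsum : Int) (isrc : Bool) (il ir : Nat) (dsrc : Bool) (dl dr : Nat),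
    ir ≤ (jSrc L C isrc).length → dr ≤ (jSrc L C dsrc).length →
    juegoLoopA fuel isum dsum (jSeg (jSrc L C isrc) il ir) (jSeg (jSrc L C dsrc) dl dr)
      = juegoLoopB fuel L C isum dsum isrc il ir dsrc dl dr := by
  induction fuel with
  | zero => intros; rfl
  | succ n ih =>
    intro isum dsum isrc il ir dsrc dl dr hi hd
    rw [juegoLoopA, juegoLoopB]
    by_cases hcond : il < ir ∧ dl < dr
    · obtain ⟨h1, h2⟩ := hcond
      have hA : ¬ (jSeg (jSrc L C isrc) il ir = [] ∨ jSeg (jSrc L C dsrc) dl dr = []) := by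
        rw [not_or, jSeg_eq_nil_iff _ _ _ hi, jSeg_eq_nil_iff _ _ _ hd]
        constructor <;> omega
      rw [if_neg hA, if_pos ⟨h1, h2⟩]
      simp only [jSeg_headD _ _ _ h1 hi, jSeg_headD _ _ _ h2 hd,
        jSeg_getLastD _ _ _ h1 hi, jSeg_getLastD _ _ _ h2 hd]
      by_cases c1 : isum + (jSrc L C isrc).getD il 0 ≥ dsum + (jSrc L C dsrc).getD dl 0 <;>
      by_cases c2 : dsum + (jSrc L C dsrc).getD (dr - 1) 0 ≥ isum + (jSrc L C isrc).getD (ir - 1) 0 <;>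
      simp only [c1, c2, if_true, if_false, jSeg_tail,
        jSeg_dropLast _ _ _ h1 hi, jSeg_dropLast _ _ _ h2 hd] <;>
      exact ih _ _ _ _ _ _ _ _ (by omega) (by omega)
    · rw [if_neg hcond, if_pos]
      rcases not_and_or.mp hcond with h | h
      · left; exact (jSeg_eq_nil_iff _ _ _ hi).mpr h
      · right; exact (jSeg_eq_nil_iff _ _ _ hd).mpr h

-- ===== VERDICT (by name: the statement is the Claim_ definition above) =====
theorem juego_spec : Claim_equal_juego := by
  intro L C costo _
  unfold Spec_juego juego juego_alt
  have h := juegoLoop_eq (L.length + C.length + 1) L C 0 0 false 0 L.length true 0 C.length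
    (by simp [jSrc]) (by simp [jSrc])
  simpa [jSeg, jSrc] using h
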